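-- pv_equiv track=rewrite | github.com/stretch5701/Learn-Python | tictactoe.py | make_cols
-- ===== SOURCE A (Python) =====
-- def make_cols(board):
--     col1, col2, col3 = [],[],[]
--     values_list = list(board.values())
--
--     for i in range(len(values_list)):
--         if i%3 == 0:
--                 col1.append(values_list[i])
--         elif i%3 == 1:
--                 col2.append(values_list[i])
--         else:
--                 col3.append(values_list[i])
--
--     return [col1, col2, col3]
-- ===== SOURCE B (Python) =====
-- def make_cols(board):
--     vals = list(board.values())
--     return [vals[0::3], vals[1::3], vals[2::3]]
-- ===== Notes on version B (the rewrite author's own statement) =====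
-- stated objective: idiomatic
-- what changed: Replaces the single loop that dispatches each value by i%3 into one of three appends with three strided slices vals[0::3], vals[1::3], vals[2::3]; the modulo branching disappears entirely.
import Mathlib
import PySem

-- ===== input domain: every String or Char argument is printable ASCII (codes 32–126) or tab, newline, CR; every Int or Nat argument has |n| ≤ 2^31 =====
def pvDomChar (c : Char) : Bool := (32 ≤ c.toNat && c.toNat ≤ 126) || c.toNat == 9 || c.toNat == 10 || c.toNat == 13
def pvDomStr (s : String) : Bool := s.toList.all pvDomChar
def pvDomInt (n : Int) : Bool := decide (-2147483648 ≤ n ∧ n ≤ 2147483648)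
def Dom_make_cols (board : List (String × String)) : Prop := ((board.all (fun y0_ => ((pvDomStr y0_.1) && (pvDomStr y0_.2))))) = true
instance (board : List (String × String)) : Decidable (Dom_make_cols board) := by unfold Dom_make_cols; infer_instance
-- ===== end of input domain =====

-- B replaces A's single i%3-dispatch loop with three strided slices vals[k::3] (idiomatic decomposition; same cost).


-- ===== PORT A =====
-- literal port of A: one loop over range(len(values_list)) dispatching by i%3 into three accumulators
def make_cols (board : List (String × String)) : List (List String) :=
  let vals := (PySem.Dict.ofList board).values
  let acc := (PySem.List.pyRange 0 (PySem.List.len vals) 1).foldl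
    (fun (acc : List String × List String × List String) i =>
      match PySem.List.pyGet? vals i with
      | some v =>
        if PySem.Int.mod i 3 = 0 then (acc.1 ++ [v], acc.2.1, acc.2.2)
        else if PySem.Int.mod i 3 = 1 then (acc.1, acc.2.1 ++ [v], acc.2.2)
        else (acc.1, acc.2.1, acc.2.2 ++ [v])
      | none => acc)   -- unreachable: i ranges over valid indices of vals
    ([], [], [])
  [acc.1, acc.2.1, acc.2.2]

-- ===== PORT B =====
-- literal port of B: vals[0::3], vals[1::3], vals[2::3]; step 3 ≠ 0 so slice? is always some (getD [] unreachable)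
def make_cols_alt (board : List (String × String)) : List (List String) :=
  let vals := (PySem.Dict.ofList board).values
  [ (PySem.List.slice? vals (some 0) none 3).getD [],
    (PySem.List.slice? vals (some 1) none 3).getD [],
    (PySem.List.slice? vals (some 2) none 3).getD [] ]

-- ===== PRECONDITION & SPEC =====
def Spec_make_cols (board : List (String × String)) (out : List (List String)) : Prop := out = make_cols_alt board
instance (board : List (String × String)) (out : List (List String)) : Decidable (Spec_make_cols board out) := by unfold Spec_make_cols; infer_instance

-- ===== CLAIM (what is proved, stated in full; the proofs are below) =====
def Claim_equal_make_cols : Prop := ∀ (board : List (String × String)), Dom_make_cols board → Spec_make_cols board (make_cols board)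

-- ===== LEMMAS AND PROOFS =====

-- the common characterisation: the elements of l at indices < n that are ≡ k (mod 3)
def sel (k n : Nat) (l : List String) : List String :=
  ((List.range n).filter (fun i => i % 3 = k)).map (fun i => l.getD i "")

-- Nat arithmetic core of a k::3 slice: the strided index progression IS the filtered range
lemma range_stride (k n : Nat) (hk : k < 3) :
    (List.range ((n + 2 - k) / 3)).map (fun j => k + 3 * j)
      = (List.range n).filter (fun i => i % 3 = k) := by
  induction n with
  | zero =>
    have : (0 + 2 - k) / 3 = 0 := by omega
    simp [this]
  | succ n ih =>
    rw [List.range_succ, List.filter_append]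
    by_cases h : n % 3 = k
    · have hc : (n + 1 + 2 - k) / 3 = (n + 2 - k) / 3 + 1 := by omega
      have hv : k + 3 * ((n + 2 - k) / 3) = n := by omega
      rw [hc, List.range_succ, List.map_append, ih]
      simp [h, hv]
    · have hc : (n + 1 + 2 - k) / 3 = (n + 2 - k) / 3 := by omega
      rw [hc, ih]
      simp [h]

-- B side: each strided slice computes sel
lemma slice_eq_sel (vals : List String) (k : Nat) (hk : k < 3) :
    PySem.List.slice? vals (some (k : Int)) none 3 = some (sel k vals.length vals) := by
  have hk0 : (0:Int) ≤ (k:Int) := Int.natCast_nonneg k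
  simp only [PySem.List.slice?, PySem.List.sliceIndices]
  rw [if_neg (by omega : ¬ ((k:Int) < 0))]
  norm_num
  by_cases hkn : vals.length ≤ k
  · -- k past the end: empty slice, and sel is empty too
    rw [min_eq_right (by exact_mod_cast hkn), if_neg (by omega)]
    have : sel k vals.length vals = [] := by
      simp only [sel, List.map_eq_nil_iff, List.filter_eq_nil_iff]
      intro i hi
      simp only [List.mem_range] at hi
      simp only [decide_eq_true_eq]
      omega
    simp [this]
  · rw [not_le] at hkn
    rw [min_eq_left (by exact_mod_cast hkn.le), if_pos (by exact_mod_cast hkn)]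
    have hcnt : (((vals.length : Int) - (k:Int) + 3 - 1) / 3).toNat = (vals.length + 2 - k) / 3 := by
      have h1 : ((vals.length : Int) - (k:Int) + 3 - 1) = ((vals.length + 2 - k : Nat) : Int) := by
        omega
      rw [h1]
      omega
    rw [hcnt]
    set cnt := (vals.length + 2 - k) / 3 with hc
    have hcongr : ∀ j ∈ List.range cnt,
        vals[((k:Int) + 3 * (j:Int)).toNat]? = some (vals.getD (k + 3 * j) "") := by
      intro j hj
      simp only [List.mem_range] at hj
      have hidx : ((k:Int) + 3 * (j:Int)).toNat = k + 3 * j := by omega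
      have hlt : k + 3 * j < vals.length := by omega
      rw [hidx, List.getElem?_eq_getElem hlt, List.getD_eq_getElem vals "" hlt]
    rw [List.filterMap_congr hcongr]
    rw [show (fun x => some (vals.getD (k + 3 * x) "")) = some ∘ (fun x => vals.getD (k + 3 * x) "") from rfl, List.filterMap_eq_map]
    have : List.map (fun j => vals.getD (k + 3 * j) "") (List.range cnt)
        = List.map (fun i => vals.getD i "") (List.map (fun j => k + 3 * j) (List.range cnt)) := by
      rw [List.map_map]
      rfl
    rw [this, hc, range_stride k vals.length hk]
    rfl

-- A side: the dispatch loop computes the three sels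
lemma fold_eq_sel (vals : List String) (n : Nat) (hn : n ≤ vals.length) :
    (List.map (fun k => (Nat.cast k : Int)) (List.range n)).foldl
      (fun (acc : List String × List String × List String) i =>
        match PySem.List.pyGet? vals i with
        | some v =>
          if PySem.Int.mod i 3 = 0 then (acc.1 ++ [v], acc.2.1, acc.2.2)
          else if PySem.Int.mod i 3 = 1 then (acc.1, acc.2.1 ++ [v], acc.2.2)
          else (acc.1, acc.2.1, acc.2.2 ++ [v])
        | none => acc)
      ([], [], [])
      = (sel 0 n vals, sel 1 n vals, sel 2 n vals) := by
  induction n with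
  | zero => simp [sel]
  | succ n ih =>
    have hlt : n < vals.length := by omega
    rw [List.range_succ, List.map_append, List.foldl_append, ih (by omega)]
    simp only [List.map_cons, List.map_nil, List.foldl_cons, List.foldl_nil]
    have hget : PySem.List.pyGet? vals (Nat.cast n : Int) = some (vals.getD n "") := by
      rw [PySem.List.pyGet?_natCast, List.getElem?_eq_getElem hlt, List.getD_eq_getElem vals "" hlt]
    have hmod : PySem.Int.mod (Nat.cast n : Int) 3 = ((n % 3 : Nat) : Int) := PySem.Int.mod_natCast n 3
    rw [hget]
    have hsel : ∀ k, sel k (n+1) vals = sel k n vals ++ (if n % 3 = k then [vals.getD n ""] else []) := by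
      intro k
      by_cases h : n % 3 = k <;> simp [sel, List.range_succ, List.filter_append, h]
    have h3 : n % 3 = 0 ∨ n % 3 = 1 ∨ n % 3 = 2 := by omega
    rcases h3 with h|h|h <;> simp only [hmod, h, hsel] <;> norm_num

-- ===== VERDICT (by name: the statement is the Claim_ definition above) =====
theorem make_cols_spec : Claim_equal_make_cols := by
  intro board _
  unfold Spec_make_cols make_cols make_cols_alt
  set vals := (PySem.Dict.ofList board).values with hv
  simp only [PySem.List.len, PySem.List.pyRange_zero_nat]
  have h0 : PySem.List.slice? vals (some 0) none 3 = some (sel 0 vals.length vals) :=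
    slice_eq_sel vals 0 (by omega)
  have h1 : PySem.List.slice? vals (some 1) none 3 = some (sel 1 vals.length vals) :=
    slice_eq_sel vals 1 (by omega)
  have h2 : PySem.List.slice? vals (some 2) none 3 = some (sel 2 vals.length vals) :=
    slice_eq_sel vals 2 (by omega)
  rw [fold_eq_sel vals vals.length le_rfl, h0, h1, h2]
  rfl
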